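-- pv_equiv track=rewrite | github.com/WatVis/CoUX | video-analysis-engine/src/process_audio.py | get_ux_keywords
-- ===== SOURCE A (Python) =====
-- questions = ['who', 'what', 'where', 'why', 'how', 'maybe']
--
-- negations = ['no', 'not', 'none', "don't", "doesn't", "didn't" , "can't", 'but']
--
-- fillers = ['okay', 'like']
--
-- def get_ux_keywords(text):
--     text_list = text.split(' ')
--     output_tokens = {'q': 0, 'n': 0, 'f': 0}
--     ret = []
--     for i in text_list:
--         if i in questions:
--             output_tokens['q'] += 1
--         elif i in negations:
--             output_tokens['n'] += 1
--         elif i in fillers: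
--             output_tokens['f'] += 1
--     for k in output_tokens.keys():
--         if output_tokens[k] > 0:
--             ret.append(k)
--     return ret
-- ===== SOURCE B (Python) =====
-- questions = ['who', 'what', 'where', 'why', 'how', 'maybe']
--
-- negations = ['no', 'not', 'none', "don't", "doesn't", "didn't" , "can't", 'but']
--
-- fillers = ['okay', 'like']
--
-- def get_ux_keywords(text):
--     words = set(text.split(' '))
--     ret = []
--     for key, cat in (('q', questions), ('n', negations), ('f', fillers)):
--         if words & set(cat):
--             ret.append(key)
--     return ret
-- ===== Notes on version B (the rewrite author's own statement) =====
-- stated objective: idiomatic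
-- what changed: Replaced per-token classification into a count dict followed by a key scan with a word set intersected against each of the three category sets in fixed order, appending the category key when the intersection is non-empty.
import Mathlib
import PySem

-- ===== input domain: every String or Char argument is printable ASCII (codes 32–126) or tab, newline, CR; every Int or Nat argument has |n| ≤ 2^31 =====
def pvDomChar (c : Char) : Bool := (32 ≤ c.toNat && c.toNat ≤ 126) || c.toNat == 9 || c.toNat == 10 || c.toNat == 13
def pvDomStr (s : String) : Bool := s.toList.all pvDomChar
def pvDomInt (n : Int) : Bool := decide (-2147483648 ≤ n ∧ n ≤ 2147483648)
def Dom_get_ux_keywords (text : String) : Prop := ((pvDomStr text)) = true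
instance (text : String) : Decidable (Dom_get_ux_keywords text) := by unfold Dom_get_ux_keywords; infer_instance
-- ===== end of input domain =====

-- B replaces A's per-token count-dict classification and key scan by one word set intersected with each category in fixed order (idiomatic; same result, similar cost).


-- module constants shared by both Pythons
def pvQuestions : List String := ["who", "what", "where", "why", "how", "maybe"]
def pvNegations : List String := ["no", "not", "none", "don't", "doesn't", "didn't", "can't", "but"]
def pvFillers : List String := ["okay", "like"]

-- ===== PORT A =====
-- A's loop body as a named helper (the if/elif classification of one token)
def pvStepA (d : PySem.Dict String Int) (i : String) : PySem.Dict String Int :=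
  if pvQuestions.contains i then PySem.Dict.modify d "q" 0 (· + 1)
  else if pvNegations.contains i then PySem.Dict.modify d "n" 0 (· + 1)
  else if pvFillers.contains i then PySem.Dict.modify d "f" 0 (· + 1)
  else d

def get_ux_keywords (text : String) : List String :=
  let text_list := (PySem.Str.split? text " ").getD []   -- sep " " ≠ "" so split? is always some
  let output_tokens : PySem.Dict String Int := PySem.Dict.mk [("q", 0), ("n", 0), ("f", 0)]
  let d := text_list.foldl pvStepA output_tokens
  d.keys.foldl (fun ret k => if d.getD k 0 > 0 then ret ++ [k] else ret) []

-- ===== PORT B =====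
def get_ux_keywords_alt (text : String) : List String :=
  let words : PySem.Set String := PySem.Set.ofList ((PySem.Str.split? text " ").getD [])
  [("q", pvQuestions), ("n", pvNegations), ("f", pvFillers)].foldl
    (fun ret kc => if PySem.Set.inter words (PySem.Set.ofList kc.2) ≠ [] then ret ++ [kc.1] else ret) []

-- ===== PRECONDITION & SPEC =====
def Spec_get_ux_keywords (text : String) (out : List String) : Prop := out = get_ux_keywords_alt text
instance (text : String) (out : List String) : Decidable (Spec_get_ux_keywords text out) := by unfold Spec_get_ux_keywords; infer_instance

-- ===== CLAIM (what is proved, stated in full; the proofs are below) =====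
def Claim_equal_get_ux_keywords : Prop := ∀ (text : String), Dom_get_ux_keywords text → Spec_get_ux_keywords text (get_ux_keywords text)

-- ===== LEMMAS AND PROOFS =====

-- the three category lists are pairwise disjoint (so A's elif counts pure membership)
theorem pv_disj_qn (s : String) (h : s ∈ pvQuestions) : s ∉ pvNegations := by fin_cases h <;> decide
theorem pv_disj_qf (s : String) (h : s ∈ pvQuestions) : s ∉ pvFillers := by fin_cases h <;> decide
theorem pv_disj_nf (s : String) (h : s ∈ pvNegations) : s ∉ pvFillers := by fin_cases h <;> decide

-- one classification step, evaluated on the three-key dict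
theorem pv_step_q (a b c : Int) (t : String) (hq : t ∈ pvQuestions) :
    pvStepA (PySem.Dict.mk [("q", a), ("n", b), ("f", c)]) t = PySem.Dict.mk [("q", a + 1), ("n", b), ("f", c)] := by
  simp [pvStepA, hq, PySem.Dict.modify, PySem.Dict.insert, PySem.Dict.getD, PySem.Dict.get?]

theorem pv_step_n (a b c : Int) (t : String) (hq : t ∉ pvQuestions) (hn : t ∈ pvNegations) :
    pvStepA (PySem.Dict.mk [("q", a), ("n", b), ("f", c)]) t = PySem.Dict.mk [("q", a), ("n", b + 1), ("f", c)] := by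
  simp [pvStepA, hq, hn, PySem.Dict.modify, PySem.Dict.insert, PySem.Dict.getD, PySem.Dict.get?]

theorem pv_step_f (a b c : Int) (t : String) (hq : t ∉ pvQuestions) (hn : t ∉ pvNegations) (hf : t ∈ pvFillers) :
    pvStepA (PySem.Dict.mk [("q", a), ("n", b), ("f", c)]) t = PySem.Dict.mk [("q", a), ("n", b), ("f", c + 1)] := by
  simp [pvStepA, hq, hn, hf, PySem.Dict.modify, PySem.Dict.insert, PySem.Dict.getD, PySem.Dict.get?]

theorem pv_step_none (a b c : Int) (t : String) (hq : t ∉ pvQuestions) (hn : t ∉ pvNegations) (hf : t ∉ pvFillers) :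
    pvStepA (PySem.Dict.mk [("q", a), ("n", b), ("f", c)]) t = PySem.Dict.mk [("q", a), ("n", b), ("f", c)] := by
  simp [pvStepA, hq, hn, hf]

-- A's counting fold, characterised from an arbitrary start state
theorem pv_fold_dict (ts : List String) (a b c : Int) :
    ts.foldl pvStepA (PySem.Dict.mk [("q", a), ("n", b), ("f", c)]) =
    PySem.Dict.mk [("q", a + ts.countP (pvQuestions.contains ·)),
                   ("n", b + ts.countP (fun t => !pvQuestions.contains t && pvNegations.contains t)),
                   ("f", c + ts.countP (fun t => !pvQuestions.contains t && !pvNegations.contains t && pvFillers.contains t))] := by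
  induction ts generalizing a b c with
  | nil => simp
  | cons t ts ih =>
    by_cases hq : t ∈ pvQuestions
    · rw [List.foldl_cons, pv_step_q a b c t hq, ih]
      simp [hq]; omega
    · by_cases hn : t ∈ pvNegations
      · rw [List.foldl_cons, pv_step_n a b c t hq hn, ih]
        simp [hq, hn]; omega
      · by_cases hf : t ∈ pvFillers
        · rw [List.foldl_cons, pv_step_f a b c t hq hn hf, ih]
          simp [hq, hn, hf]; omega
        · rw [List.foldl_cons, pv_step_none a b c t hq hn hf, ih]
          simp [hq, hn, hf]

-- B's truthiness test: the intersection is non-empty iff some token is in the category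
theorem pv_inter_ne (ts cat : List String) :
    (PySem.Set.inter (PySem.Set.ofList ts) (PySem.Set.ofList cat) ≠ []) ↔ ∃ t ∈ ts, t ∈ cat := by
  simp [PySem.Set.inter, List.filter_eq_nil_iff, PySem.Set.contains]

theorem pv_equiv (text : String) : get_ux_keywords text = get_ux_keywords_alt text := by
  simp only [get_ux_keywords, get_ux_keywords_alt]
  generalize (PySem.Str.split? text " ").getD [] = ts
  rw [pv_fold_dict]
  have en : (∃ t ∈ ts, t ∉ pvQuestions ∧ t ∈ pvNegations)
      ↔ ∃ t ∈ ts, t ∈ pvNegations := by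
    constructor
    · rintro ⟨t, ht, _, hp⟩; exact ⟨t, ht, hp⟩
    · rintro ⟨t, ht, hp⟩; exact ⟨t, ht, fun h => pv_disj_qn t h hp, hp⟩
  have ef : (∃ t ∈ ts, (t ∉ pvQuestions ∧ t ∉ pvNegations) ∧ t ∈ pvFillers)
      ↔ ∃ t ∈ ts, t ∈ pvFillers := by
    constructor
    · rintro ⟨t, ht, _, hp⟩; exact ⟨t, ht, hp⟩
    · rintro ⟨t, ht, hp⟩
      exact ⟨t, ht, ⟨fun h => pv_disj_qf t h hp, fun h => pv_disj_nf t h hp⟩, hp⟩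
  by_cases Hq : ∃ t ∈ ts, t ∈ pvQuestions <;> by_cases Hn : ∃ t ∈ ts, t ∈ pvNegations <;>
    by_cases Hf : ∃ t ∈ ts, t ∈ pvFillers <;>
    simp [PySem.Dict.keys, PySem.Dict.getD, PySem.Dict.get?, pv_inter_ne, List.countP_pos_iff,
      Int.natCast_pos, en, ef, Hq, Hn, Hf]

-- ===== VERDICT (by name: the statement is the Claim_ definition above) =====
theorem get_ux_keywords_spec : Claim_equal_get_ux_keywords := by
  intro text _
  unfold Spec_get_ux_keywords
  exact pv_equiv text
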